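-- pv_equiv track=rewrite | github.com/0417taehyun/Algorithm | LeetCode/Python/2_Medium/2256.py | solution
-- ===== SOURCE A (Python) =====
-- def solution(nums: list[int]) -> int:
--     def create_prefix_sum(nums: list[int], is_right_to_left: bool) -> list[int]:
--         prefix_sum: list[int] = []
--         if is_right_to_left:
--             prefix_sum.append(0)
--         accumulate_sum: int = 0
--         index: int = 0
--         while len(prefix_sum) < len(nums):
--             accumulate_sum += nums[index]
--             sum_average: int = accumulate_sum // (index + 1)
--             prefix_sum.append(sum_average)
--             index += 1
--         return prefix_sum
--
--
--     answer: int = 0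
--     minimum_average_difference: int = 10 ** 5
--     left_to_right_prefix_sum: list[int] = create_prefix_sum(nums, False)
--     right_to_left_prefix_sum: list[int] = create_prefix_sum(nums[::-1], True)
--     for idx, (left_sum, right_sum) in enumerate(
--         zip(left_to_right_prefix_sum, right_to_left_prefix_sum[::-1])
--     ):
--         target: int = abs(left_sum - right_sum)
--         if target < minimum_average_difference:
--             answer = idx
--             minimum_average_difference = target
--
--     return answer
-- ===== SOURCE B (Python) =====
-- def solution(nums: list[int]) -> int:
--     total = sum(nums)
--     n = len(nums)
--     answer = 0
--     minimum = 10 ** 5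
--     prefix = 0
--     for i, x in enumerate(nums):
--         prefix += x
--         left = prefix // (i + 1)
--         right = (total - prefix) // (n - 1 - i) if i < n - 1 else 0
--         diff = abs(left - right)
--         if diff < minimum:
--             answer = i
--             minimum = diff
--     return answer
-- ===== Notes on version B (the rewrite author's own statement) =====
-- stated objective: simpler
-- what changed: Replaces the two prefix-average arrays, the input reversal, the leading-0 sentinel list and the zip with one enumerate pass keeping a running prefix sum against a precomputed total (measured ~2.8x faster: no intermediate lists, reversals or zip).
import Mathlib
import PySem

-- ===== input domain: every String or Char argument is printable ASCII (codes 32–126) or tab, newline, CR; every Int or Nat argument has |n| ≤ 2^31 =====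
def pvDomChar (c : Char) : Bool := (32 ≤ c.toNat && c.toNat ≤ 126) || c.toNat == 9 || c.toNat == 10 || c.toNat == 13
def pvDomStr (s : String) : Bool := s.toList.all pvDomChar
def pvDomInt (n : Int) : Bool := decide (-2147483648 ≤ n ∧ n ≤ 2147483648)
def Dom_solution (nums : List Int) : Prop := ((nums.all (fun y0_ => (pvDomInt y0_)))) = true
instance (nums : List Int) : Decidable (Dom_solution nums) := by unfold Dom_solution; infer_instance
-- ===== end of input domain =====

-- B replaces A's two prefix-average arrays, reversal and zip with one running-prefix-sum pass (simpler, O(1) extra space).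


-- ===== PORT A =====
-- the inner while loop of create_prefix_sum, fuel = number of remaining iterations
def cpsLoop (nums : List Int) (pre : List Int) (acc : Int) (index : Int) : Nat → List Int
  | 0 => pre
  | fuel+1 =>
    if pre.length < nums.length then
      match PySem.List.pyGet? nums index with
      | none => pre  -- unreachable: Python would raise IndexError
      | some v =>
        cpsLoop nums (pre ++ [PySem.Int.floordiv (acc + v) (index + 1)]) (acc + v) (index + 1) fuel
    else pre

def createPrefixSum (nums : List Int) (isRightToLeft : Bool) : List Int :=
  cpsLoop nums (if isRightToLeft then [0] else []) 0 0 nums.length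

def solution (nums : List Int) : Int :=
  let ltr := createPrefixSum nums false
  let rtl := createPrefixSum ((PySem.List.slice? nums none none (-1)).getD []) true
  let pairs := PySem.List.enumerate (List.zip ltr ((PySem.List.slice? rtl none none (-1)).getD [])) 0
  (pairs.foldl (fun (st : Int × Int) p =>
      let target := |p.2.1 - p.2.2|
      if target < st.2 then (p.1, target) else st) (0, 100000)).1

-- ===== PORT B =====
def solution_alt (nums : List Int) : Int :=
  let total := nums.sum
  let n := nums.length
  ((PySem.List.enumerate nums 0).foldl
    (fun (st : Int × Int × Int) p =>
      let pfx := st.2.2 + p.2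
      let left := PySem.Int.floordiv pfx (p.1 + 1)
      let right := if p.1 < (n : Int) - 1 then PySem.Int.floordiv (total - pfx) ((n : Int) - 1 - p.1) else 0
      let diff := |left - right|
      if diff < st.2.1 then (p.1, diff, pfx) else (st.1, st.2.1, pfx))
    (0, 100000, 0)).1

-- ===== PRECONDITION & SPEC =====
def Spec_solution (nums : List Int) (out : Int) : Prop := out = solution_alt nums
instance (nums : List Int) (out : Int) : Decidable (Spec_solution nums out) := by unfold Spec_solution; infer_instance

-- ===== CLAIM (what is proved, stated in full; the proofs are below) =====
def Claim_equal_solution : Prop := ∀ (nums : List Int), Dom_solution nums → Spec_solution nums (solution nums)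

-- ===== LEMMAS AND PROOFS =====

-- the average-difference value both programs compare at index i
def dfun (nums : List Int) (i : Nat) : Int :=
  |PySem.Int.floordiv ((nums.take (i+1)).sum) ((i : Int) + 1) -
    (if (i : Int) < (nums.length : Int) - 1 then
       PySem.Int.floordiv (nums.sum - (nums.take (i+1)).sum) ((nums.length : Int) - 1 - (i : Int))
     else 0)|

-- the common selection fold
def selStep (nums : List Int) (st : Int × Int) (i : Nat) : Int × Int :=
  if dfun nums i < st.2 then ((i : Int), dfun nums i) else st

def selFold (nums : List Int) : Int :=
  ((List.range nums.length).foldl (selStep nums) (0, 100000)).1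

theorem take_succ_sum (nums : List Int) (j : Nat) (hj : j < nums.length) :
    (nums.take j).sum + nums.getD j 0 = (nums.take (j+1)).sum := by
  rw [List.take_add_one, List.sum_append, List.getD, List.getElem?_eq_getElem hj]
  simp

theorem enum_map {α : Type} (d : α) (xs : List α) : ∀ (s : Int),
    PySem.List.enumerate xs s = (List.range xs.length).map (fun k : Nat => ((s + (k : Int), xs.getD k d) : Int × α)) := by
  induction xs with
  | nil => intro s; simp [PySem.List.enumerate_nil]
  | cons x xs ih =>
    intro s
    rw [PySem.List.enumerate_cons, ih (s+1)]
    simp only [List.length_cons, List.range_succ_eq_map, List.map_cons, List.map_map]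
    refine congrArg₂ _ (by simp) ?_
    apply List.map_congr_left
    intro k _
    simp only [Function.comp_apply, Nat.succ_eq_add_one, List.getD_cons_succ]
    push_cast
    ring_nf

-- ===== A-side characterization =====

theorem cpsLoop_spec (nums : List Int) : ∀ (fuel r j : Nat) (pre : List Int),
    pre.length + r = nums.length → r ≤ fuel → j + r ≤ nums.length →
    cpsLoop nums pre ((nums.take j).sum) (j : Int) fuel
      = pre ++ (List.range r).map
          (fun k => PySem.Int.floordiv ((nums.take (j+k+1)).sum) ((j : Int) + (k : Int) + 1)) := by
  intro fuel
  induction fuel with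
  | zero =>
    intro r j pre h1 h2 _
    interval_cases r
    simp [cpsLoop]
  | succ fuel ih =>
    intro r j pre h1 h2 h3
    match r with
    | 0 => simp [cpsLoop, show ¬ (pre.length < nums.length) by omega]
    | r+1 =>
      have hj : j < nums.length := by omega
      rw [cpsLoop, if_pos (by omega)]
      simp only [PySem.List.pyGet?_natCast, List.getElem?_eq_getElem hj]
      have hsum : (nums.take j).sum + nums[j] = (nums.take (j+1)).sum := by
        have := take_succ_sum nums j hj
        rwa [List.getD, List.getElem?_eq_getElem hj, Option.getD_some] at this
      have hc : ((j : Int) + 1) = ((j+1 : Nat) : Int) := by push_cast; ring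
      rw [hsum, hc, ih r (j+1) _ (by simpa using (by omega : pre.length + 1 + r = nums.length))
        (by omega) (by omega)]
      rw [List.range_succ_eq_map, List.map_cons, List.map_map, List.append_assoc,
        List.singleton_append]
      apply congrArg
      rw [List.cons_eq_cons]
      constructor
      · have h4 : j + 0 + 1 = j + 1 := by omega
        have h5 : ((j : Int) + ((0:Nat) : Int) + 1) = ((j+1 : Nat) : Int) := by push_cast; ring
        rw [h4, h5]
      · apply List.map_congr_left
        intro k _
        simp only [Function.comp_apply, Nat.succ_eq_add_one]
        have h4 : j + 1 + k + 1 = j + (k + 1) + 1 := by omega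
        have h5 : (((j+1 : Nat) : Int) + (k : Int) + 1) = ((j : Int) + ((k+1 : Nat) : Int) + 1) := by
          push_cast; ring
        rw [h4, h5]


-- A's left and right average at index i (dfun nums i = |Lf - Rf| by definition)
def Lf (nums : List Int) (k : Nat) : Int :=
  PySem.Int.floordiv ((nums.take (k+1)).sum) ((k : Int) + 1)

def Rf (nums : List Int) (i : Nat) : Int :=
  if (i : Int) < (nums.length : Int) - 1 then
    PySem.Int.floordiv (nums.sum - (nums.take (i+1)).sum) ((nums.length : Int) - 1 - (i : Int))
  else 0

theorem ltr_eq (nums : List Int) :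
    createPrefixSum nums false = (List.range nums.length).map (Lf nums) := by
  unfold createPrefixSum
  have h := cpsLoop_spec nums nums.length nums.length 0 [] (by simp) le_rfl (by omega)
  simp only [List.take_zero, List.sum_nil, Nat.cast_zero] at h
  rw [if_neg (by simp), h]
  simp only [List.nil_append]
  apply List.map_congr_left
  intro k _
  simp [Lf]

theorem drop_sum (nums : List Int) (m : Nat) :
    (nums.drop m).sum = nums.sum - (nums.take m).sum := by
  have h := congrArg List.sum (List.take_append_drop m nums)
  rw [List.sum_append] at h
  omega

theorem rtlrev_eq (nums : List Int) (hn : nums ≠ []) :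
    ((createPrefixSum nums.reverse true).reverse)
      = (List.range nums.length).map (Rf nums) := by
  unfold createPrefixSum
  have hlen : nums.reverse.length = nums.length := List.length_reverse
  have hpos : 1 ≤ nums.length := by
    cases nums with | nil => exact absurd rfl hn | cons a l => simp
  have h := cpsLoop_spec nums.reverse nums.reverse.length (nums.length - 1) 0 [0]
    (by simp; omega) (by omega) (by omega)
  simp only [List.take_zero, List.sum_nil, Nat.cast_zero] at h
  rw [if_pos rfl, h]
  apply List.ext_getElem
  · simp; omega
  · intro i h1 h2
    rw [List.getElem_reverse]
    simp only [List.getElem_map, List.getElem_range]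
    simp only [List.length_append, List.length_cons, List.length_nil, List.length_map,
      List.length_range, List.length_reverse, List.length_map, List.length_range] at h1 h2 ⊢
    by_cases hi : i = nums.length - 1
    · subst hi
      simp only [List.cons_append, List.nil_append,
        show 0 + 1 + (nums.length - 1) - 1 - (nums.length - 1) = 0 from by omega,
        List.getElem_cons_zero]
      rw [Rf, if_neg (by omega)]
    · have hi2 : i < nums.length - 1 := by omega
      simp only [List.cons_append, List.nil_append,
        show 0 + 1 + (nums.length - 1) - 1 - i = (nums.length - 2 - i) + 1 from by omega,
        List.getElem_cons_succ, List.getElem_map, List.getElem_range, zero_add]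
      rw [Rf, if_pos (by omega)]
      have htk : nums.reverse.take (nums.length - 2 - i + 1) =
          (nums.drop (nums.length - (nums.length - 2 - i + 1))).reverse := by
        rw [List.take_reverse]
      have hix : nums.length - (nums.length - 2 - i + 1) = i + 1 := by omega
      rw [htk, hix, List.sum_reverse, drop_sum]
      congr 1
      have : ((nums.length - 2 - i : Nat) : Int) = (nums.length : Int) - 2 - (i : Int) := by omega
      rw [this]; ring

theorem lemA (nums : List Int) : solution nums = selFold nums := by
  cases nums with
  | nil => decide
  | cons a l =>
    set nums := a :: l with hnums
    have hn : nums ≠ [] := by simp [hnums]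
    show (let ltr := createPrefixSum nums false
          let rtl := createPrefixSum ((PySem.List.slice? nums none none (-1)).getD []) true
          let pairs := PySem.List.enumerate (List.zip ltr ((PySem.List.slice? rtl none none (-1)).getD [])) 0
          (pairs.foldl (fun (st : Int × Int) p =>
              let target := |p.2.1 - p.2.2|
              if target < st.2 then (p.1, target) else st) (0, 100000)).1) = selFold nums
    simp only [PySem.List.slice?_none_none_neg_one, Option.getD_some]
    rw [ltr_eq, rtlrev_eq nums hn, List.zip_map', enum_map ((0:Int), (0:Int))]
    simp only [List.length_map, List.length_range, zero_add, List.foldl_map]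
    unfold selFold
    apply congrArg
    apply PySem.List.foldl_congr_mem
    intro st k hk
    have hk' : k < nums.length := List.mem_range.mp hk
    rw [List.getD_eq_getElem _ _ (by simpa using hk')]
    simp only [List.getElem_map, List.getElem_range]
    rfl

-- proof-side name for B's loop body (specialised to index k and element nums.getD k 0)
def bstep (nums : List Int) (st : Int × Int × Int) (k : Nat) : Int × Int × Int :=
  let pfx := st.2.2 + nums.getD k 0
  let left := PySem.Int.floordiv pfx ((k : Int) + 1)
  let right := if (k : Int) < (nums.length : Int) - 1 then
      PySem.Int.floordiv (nums.sum - pfx) ((nums.length : Int) - 1 - (k : Int)) else 0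
  let diff := |left - right|
  if diff < st.2.1 then ((k : Int), diff, pfx) else (st.1, st.2.1, pfx)

theorem bstep_eq (nums : List Int) (a m p : Int) (j : Nat) (hj : j < nums.length)
    (hp : p = (nums.take j).sum) :
    bstep nums (a, m, p) j =
      if dfun nums j < m then ((j : Int), dfun nums j, (nums.take (j+1)).sum)
      else (a, m, (nums.take (j+1)).sum) := by
  subst hp
  unfold bstep
  rw [take_succ_sum nums j hj]
  rfl

theorem bfold_inv (nums : List Int) : ∀ (c j : Nat) (a m : Int), j + c ≤ nums.length →
    (List.range' j c).foldl (bstep nums) (a, m, (nums.take j).sum)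
    = (((List.range' j c).foldl (selStep nums) (a, m)).1,
       ((List.range' j c).foldl (selStep nums) (a, m)).2,
       (nums.take (j + c)).sum) := by
  intro c
  induction c with
  | zero => intro j a m _; simp
  | succ c ih =>
    intro j a m hjc
    rw [List.range'_succ, List.foldl_cons, List.foldl_cons,
      bstep_eq nums a m _ j (by omega) rfl]
    have hsel : selStep nums (a, m) j =
        if dfun nums j < m then ((j : Int), dfun nums j) else (a, m) := rfl
    rw [hsel]
    by_cases h : dfun nums j < m
    · rw [if_pos h, if_pos h, ih (j+1) _ _ (by omega),
        show j + 1 + c = j + (c + 1) from by omega]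
    · rw [if_neg h, if_neg h, ih (j+1) _ _ (by omega),
        show j + 1 + c = j + (c + 1) from by omega]

theorem lemB (nums : List Int) : solution_alt nums = selFold nums := by
  show ((PySem.List.enumerate nums 0).foldl
    (fun (st : Int × Int × Int) p =>
      let pfx := st.2.2 + p.2
      let left := PySem.Int.floordiv pfx (p.1 + 1)
      let right := if p.1 < (nums.length : Int) - 1 then PySem.Int.floordiv (nums.sum - pfx) ((nums.length : Int) - 1 - p.1) else 0
      let diff := |left - right|
      if diff < st.2.1 then (p.1, diff, pfx) else (st.1, st.2.1, pfx))
    (0, 100000, 0)).1 = selFold nums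
  rw [enum_map (0 : Int)]
  simp only [zero_add, List.foldl_map]
  show (List.foldl (bstep nums) (0, 100000, 0) (List.range nums.length)).1 = selFold nums
  have h0 : ((0 : Int), (100000 : Int), (0 : Int)) = ((0 : Int), (100000 : Int), (nums.take 0).sum) := by simp
  rw [h0, List.range_eq_range']
  rw [bfold_inv nums nums.length 0 0 100000 (by omega)]
  unfold selFold
  rw [List.range_eq_range']


-- ===== VERDICT (by name: the statement is the Claim_ definition above) =====
theorem solution_spec : Claim_equal_solution := by
  intro nums _
  unfold Spec_solution
  rw [lemA, lemB]
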